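-- pv_equiv track=rewrite | github.com/bbartling/open-fdd-automated-testing | openfdd_stack/platform/drivers/csv_driver.py | _infer_timestamp_column
-- ===== SOURCE A (Python) =====
-- def _infer_timestamp_column(columns: list[str]) -> str:
--     for col in columns:
--         if str(col).strip().casefold() == "timestamp":
--             return col
--     for col in columns:
--         if "timestamp" in str(col).strip().casefold():
--             return col
--     raise ValueError("CSV missing a timestamp column")
-- ===== SOURCE B (Python) =====
-- def _infer_timestamp_column(columns: list[str]) -> str:
--     fallback = None
--     for col in columns:
--         norm = str(col).strip().casefold()
--         if norm == "timestamp":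
--             return col
--         if fallback is None and "timestamp" in norm:
--             fallback = col
--     if fallback is not None:
--         return fallback
--     raise ValueError("CSV missing a timestamp column")
-- ===== Notes on version B (the rewrite author's own statement) =====
-- stated objective: simpler
-- what changed: Two sequential scans (exact match, then substring match) are fused into one pass that returns on an exact match and maintains the first substring hit as a fallback.
import Mathlib
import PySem

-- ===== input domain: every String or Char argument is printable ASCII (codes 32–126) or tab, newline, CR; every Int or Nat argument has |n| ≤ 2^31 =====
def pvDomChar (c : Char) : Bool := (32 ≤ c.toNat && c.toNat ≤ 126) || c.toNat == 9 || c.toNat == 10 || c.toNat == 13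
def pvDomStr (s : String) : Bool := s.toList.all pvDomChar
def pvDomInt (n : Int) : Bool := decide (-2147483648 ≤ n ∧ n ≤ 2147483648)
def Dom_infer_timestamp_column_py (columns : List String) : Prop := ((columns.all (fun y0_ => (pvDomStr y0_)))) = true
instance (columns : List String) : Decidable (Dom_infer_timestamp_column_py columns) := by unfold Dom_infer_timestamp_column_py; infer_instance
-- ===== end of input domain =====

-- B fuses A's two scans into one pass that keeps the first substring hit as a fallback (simpler: one loop, each column normalized once).
-- casefold is ported as PySem.Str.lower: exact on the ASCII domain Dom_.

-- ===== PORT A =====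
-- first loop of A: first column whose normalized form equals "timestamp"
def pvFindExact : List String → Option String
  | [] => none
  | c :: rest =>
    if PySem.Str.lower (PySem.Str.strip c) == "timestamp" then some c else pvFindExact rest

-- second loop of A: first column whose normalized form contains "timestamp"
def pvFindSub : List String → Option String
  | [] => none
  | c :: rest =>
    if PySem.Str.isIn "timestamp" (PySem.Str.lower (PySem.Str.strip c)) then some c
    else pvFindSub rest

def infer_timestamp_column_py (columns : List String) : String :=
  match pvFindExact columns with
  | some c => c
  | none =>
    match pvFindSub columns with
    | some c => c
    | none => ""  -- Python raises ValueError here; excluded by Pre_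

-- ===== PORT B =====
-- single pass with a maintained fallback (B's loop, fallback as accumulator)
def pvLoopB : List String → Option String → String
  | [], fb => match fb with
    | some f => f
    | none => ""  -- Python raises ValueError here; excluded by Pre_
  | c :: rest, fb =>
    let norm := PySem.Str.lower (PySem.Str.strip c)
    if norm == "timestamp" then c
    else pvLoopB rest (if fb.isNone && PySem.Str.isIn "timestamp" norm then some c else fb)

def infer_timestamp_column_py_alt (columns : List String) : String :=
  pvLoopB columns none

-- ===== PRECONDITION & SPEC =====
-- Pre_ excludes exactly the inputs where A raises ValueError: no column contains "timestamp" after normalization.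
def Pre_infer_timestamp_column_py (columns : List String) : Prop :=
  (columns.any (fun c => PySem.Str.isIn "timestamp" (PySem.Str.lower (PySem.Str.strip c)))) = true
instance (columns : List String) : Decidable (Pre_infer_timestamp_column_py columns) := by
  unfold Pre_infer_timestamp_column_py; infer_instance

def pvWitness_infer_timestamp_column_py : List String := [" Timestamp "]

def Spec_infer_timestamp_column_py (columns : List String) (out : String) : Prop :=
  out = infer_timestamp_column_py_alt columns
instance (columns : List String) (out : String) : Decidable (Spec_infer_timestamp_column_py columns out) := by
  unfold Spec_infer_timestamp_column_py; infer_instance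

-- ===== CLAIM (what is proved, stated in full; the proofs are below) =====
def Claim_equal_infer_timestamp_column_py : Prop :=
  ∀ (columns : List String), Dom_infer_timestamp_column_py columns →
    Pre_infer_timestamp_column_py columns →
    Spec_infer_timestamp_column_py columns (infer_timestamp_column_py columns)

-- ===== LEMMAS AND PROOFS =====

-- loop invariant: B's single pass equals A's two-pass result, with the fallback
-- standing in for the substring scan of the already-consumed prefix
theorem pvLoopB_eq (cols : List String) : ∀ fb : Option String,
    pvLoopB cols fb =
      match pvFindExact cols with
      | some c => c
      | none =>
        match fb with
        | some f => f
        | none => match pvFindSub cols with | some c => c | none => "" := by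
  induction cols with
  | nil => intro fb; cases fb <;> simp [pvLoopB, pvFindExact, pvFindSub]
  | cons c rest ih =>
    intro fb
    by_cases hx : (PySem.Str.lower (PySem.Str.strip c) == "timestamp") = true
    · simp [pvLoopB, pvFindExact, hx]
    · cases fb with
      | some f => simp [pvLoopB, pvFindExact, hx, ih]
      | none =>
        simp [pvLoopB, pvFindExact, pvFindSub, hx, ih]
        cases pvFindExact rest with
        | some a => rfl
        | none =>
          by_cases h : PySem.Chars.isIn ['t','i','m','e','s','t','a','m','p']
              (PySem.Chars.lower (PySem.Chars.strip c.toList)) = true <;> simp [h]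

-- ===== VERDICT (by name: the statement is the Claim_ definition above) =====
theorem infer_timestamp_column_py_spec : Claim_equal_infer_timestamp_column_py := by
  intro columns _ _
  unfold Spec_infer_timestamp_column_py infer_timestamp_column_py infer_timestamp_column_py_alt
  rw [pvLoopB_eq]
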